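-- pv_equiv track=rewrite | github.com/TessFerrandez/AdventOfCode-Python | 2017/day24.py | find_totals
-- ===== SOURCE A (Python) =====
-- def find_totals(dominoes: list, last_num: int) -> list:
--     totals = []
--     possible = [domino for domino in dominoes if last_num in domino]
--     for domino in possible:
--         dominoes_left = [d for d in dominoes if d != domino]
--         if domino[0] == last_num:
--             totals.append(sum(domino))
--             for total in find_totals(dominoes_left, domino[1]):
--                 totals.append(sum(domino) + total)
--         else:
--             totals.append(sum(domino))
--             for total in find_totals(dominoes_left, domino[0]):
--                 totals.append(sum(domino) + total)
--     return totals
-- ===== SOURCE B (Python) =====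
-- def find_totals(dominoes: list, last_num: int) -> list:
--     # Iterative explicit-stack DFS; frames carry the cumulative bridge sum (None for the root).
--     totals = []
--     stack = [(dominoes, last_num, None)]
--     while stack:
--         remaining, last, acc = stack.pop()
--         if acc is not None:
--             totals.append(acc)
--         base = 0 if acc is None else acc
--         children = []
--         for d in remaining:
--             if last in d:
--                 other = d[1] if d[0] == last else d[0]
--                 children.append(([x for x in remaining if x != d], other, base + d[0] + d[1]))
--         stack.extend(reversed(children))
--     return totals
-- ===== Notes on version B (the rewrite author's own statement) =====
-- stated objective: alternative
-- what changed: Replaces A's recursion (recursive calls whose results are re-offset by sum(domino) at every level) by an iterative explicit-stack DFS whose frames carry the cumulative bridge sum, pushing children in reversed order to reproduce A's exact pre-order output.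
import Mathlib
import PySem

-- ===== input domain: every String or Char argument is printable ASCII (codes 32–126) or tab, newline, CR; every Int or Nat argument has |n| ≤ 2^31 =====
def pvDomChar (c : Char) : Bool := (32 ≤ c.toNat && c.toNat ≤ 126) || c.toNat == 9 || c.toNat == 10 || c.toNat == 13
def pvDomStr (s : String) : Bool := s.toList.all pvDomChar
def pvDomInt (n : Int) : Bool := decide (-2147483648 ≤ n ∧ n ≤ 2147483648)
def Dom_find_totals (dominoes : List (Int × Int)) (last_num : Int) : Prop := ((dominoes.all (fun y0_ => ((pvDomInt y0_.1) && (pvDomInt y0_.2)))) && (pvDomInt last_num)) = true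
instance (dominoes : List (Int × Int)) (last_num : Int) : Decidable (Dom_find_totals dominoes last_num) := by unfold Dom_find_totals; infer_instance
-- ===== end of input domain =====

-- B replaces A's recursion by an explicit-stack iterative DFS carrying cumulative bridge sums (alternative decomposition, same cost; return value only).


-- ===== PORT A =====
-- literal transliteration of A: filter 'possible', loop over it appending sum(domino) and the
-- offset recursive totals ('attach' only carries the membership fact used for termination)
def find_totals (dominoes : List (Int × Int)) (last_num : Int) : List Int :=
  (dominoes.filter (fun d => d.1 == last_num || d.2 == last_num)).attach.foldl
    (fun totals d =>
      let dominoes_left := dominoes.filter (fun x => x ≠ d.1)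
      if d.1.1 == last_num then
        totals ++ (d.1.1 + d.1.2) :: (find_totals dominoes_left d.1.2).map (fun t => (d.1.1 + d.1.2) + t)
      else
        totals ++ (d.1.1 + d.1.2) :: (find_totals dominoes_left d.1.1).map (fun t => (d.1.1 + d.1.2) + t))
    []
termination_by dominoes.length
decreasing_by
  all_goals
    have hmem : d.1 ∈ dominoes := (List.mem_filter.mp d.2).1
    have h2 : (dominoes.attach.filter (fun x => decide (x.1 ≠ d.1))).length < dominoes.attach.length :=
      List.length_filter_lt_length_iff_exists.mpr ⟨⟨d.1, hmem⟩, List.mem_attach _ _, by simp⟩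
    simpa using h2

-- ===== PORT B =====
-- transliteration of Source B's while-loop: the stack head is the top of Python's list (its end);
-- 'stack.extend(reversed(children))' puts the children, in order, on top, i.e. new stack = children ++ rest.
-- 'fuel' is only a totality guard for the loop; the factorial fuel is proved sufficient below.
def altRun (fuel : Nat) (stack : List ((List (Int × Int)) × Int × Option Int)) (totals : List Int) :
    List Int :=
  match fuel, stack with
  | _, [] => totals
  | 0, _ => totals
  | fuel + 1, (remaining, last, acc) :: rest =>
    let totals' := match acc with | some a => totals ++ [a] | none => totals
    let base : Int := match acc with | some a => a | none => 0
    let children := (remaining.filter (fun d => d.1 == last || d.2 == last)).map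
      (fun d => (remaining.filter (fun x => x ≠ d),
                 (if d.1 == last then d.2 else d.1),
                 some (base + (d.1 + d.2))))
    altRun fuel (children ++ rest) totals'

def find_totals_alt (dominoes : List (Int × Int)) (last_num : Int) : List Int :=
  altRun (Nat.factorial (dominoes.length + 1)) [(dominoes, last_num, none)] []

-- ===== PRECONDITION & SPEC =====
def Spec_find_totals (dominoes : List (Int × Int)) (last_num : Int) (out : List Int) : Prop := out = find_totals_alt dominoes last_num
instance (dominoes : List (Int × Int)) (last_num : Int) (out : List Int) : Decidable (Spec_find_totals dominoes last_num out) := by unfold Spec_find_totals; infer_instance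

-- ===== CLAIM (what is proved, stated in full; the proofs are below) =====
def Claim_equal_find_totals : Prop := ∀ (dominoes : List (Int × Int)) (last_num : Int), Dom_find_totals dominoes last_num → Spec_find_totals dominoes last_num (find_totals dominoes last_num)

-- ===== LEMMAS AND PROOFS =====

theorem foldl_attach_append {α β : Type} (l : List α) (g : α → List β) (init : List β) :
    l.attach.foldl (fun acc x => acc ++ g x.1) init = init ++ l.flatMap g := by
  rw [List.foldl_attach (f := fun acc x => acc ++ g x)]
  exact PySem.List.foldl_append_eq_flatMap g l init

theorem find_totals_eq (dominoes : List (Int × Int)) (last_num : Int) :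
    find_totals dominoes last_num =
      (dominoes.filter (fun d => d.1 == last_num || d.2 == last_num)).flatMap
        (fun d => (d.1 + d.2) ::
          (find_totals (dominoes.filter (fun x => x ≠ d)) (if d.1 == last_num then d.2 else d.1)).map
            (fun t => (d.1 + d.2) + t)) := by
  rw [find_totals]
  rw [show (fun (totals : List Int) (d : {x // x ∈ dominoes.filter (fun d => d.1 == last_num || d.2 == last_num)}) =>
      let dominoes_left := dominoes.filter (fun x => x ≠ d.1)
      if d.1.1 == last_num then
        totals ++ (d.1.1 + d.1.2) :: (find_totals dominoes_left d.1.2).map (fun t => (d.1.1 + d.1.2) + t)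
      else
        totals ++ (d.1.1 + d.1.2) :: (find_totals dominoes_left d.1.1).map (fun t => (d.1.1 + d.1.2) + t))
    = (fun totals d => totals ++ ((d.1.1 + d.1.2) ::
        (find_totals (dominoes.filter (fun x => x ≠ d.1)) (if d.1.1 == last_num then d.1.2 else d.1.1)).map
          (fun t => (d.1.1 + d.1.2) + t))) from by
      funext totals d
      by_cases h : d.1.1 == last_num <;> simp [h]]
  simpa using foldl_attach_append (dominoes.filter (fun d => d.1 == last_num || d.2 == last_num))
    (fun d => (d.1 + d.2) ::
      (find_totals (dominoes.filter (fun x => x ≠ d)) (if d.1 == last_num then d.2 else d.1)).map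
        (fun t => (d.1 + d.2) + t)) []

def frameOut (f : (List (Int × Int)) × Int × Option Int) : List Int :=
  match f.2.2 with
  | none => find_totals f.1 f.2.1
  | some a => a :: (find_totals f.1 f.2.1).map (fun t => a + t)

def wt (stack : List ((List (Int × Int)) × Int × Option Int)) : Nat :=
  (stack.map (fun f => Nat.factorial (f.1.length + 1))).sum

theorem wt_append (a b : List ((List (Int × Int)) × Int × Option Int)) : wt (a ++ b) = wt a + wt b := by
  simp [wt]

theorem wt_children_le (rem : List (Int × Int)) (last : Int) (base : Int) :
    wt (((rem.filter (fun d => d.1 == last || d.2 == last))).map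
      (fun d => (rem.filter (fun x => x ≠ d), (if d.1 == last then d.2 else d.1), some (base + (d.1 + d.2)))))
    ≤ rem.length * Nat.factorial rem.length := by
  unfold wt
  rw [List.map_map]
  have hb : ∀ x ∈ (rem.filter (fun d => d.1 == last || d.2 == last)).map
      ((fun f => Nat.factorial (f.1.length + 1)) ∘
        (fun d => (rem.filter (fun x => x ≠ d), (if d.1 == last then d.2 else d.1), some (base + (d.1 + d.2))))),
      x ≤ Nat.factorial rem.length := by
    intro x hx
    obtain ⟨d, hd, rfl⟩ := List.mem_map.mp hx
    simp only [Function.comp_apply]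
    have hmem : d ∈ rem := (List.mem_filter.mp hd).1
    have hlt : (rem.filter (fun x => x ≠ d)).length < rem.length :=
      List.length_filter_lt_length_iff_exists.mpr ⟨d, hmem, by simp⟩
    exact Nat.factorial_le (by omega)
  calc _ ≤ _ • Nat.factorial rem.length := List.sum_le_card_nsmul _ _ hb
  _ ≤ rem.length * Nat.factorial rem.length := by
        simp only [smul_eq_mul, List.length_map]
        exact Nat.mul_le_mul_right _ (List.length_filter_le _ _)

theorem altRun_succ (fuel : Nat) (rem : List (Int × Int)) (last : Int) (acc : Option Int)
    (rest : List ((List (Int × Int)) × Int × Option Int)) (totals : List Int) :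
    altRun (fuel + 1) ((rem, last, acc) :: rest) totals =
      altRun fuel
        (((rem.filter (fun d => d.1 == last || d.2 == last)).map
          (fun d => (rem.filter (fun x => x ≠ d), (if d.1 == last then d.2 else d.1),
            some ((acc.getD 0) + (d.1 + d.2))))) ++ rest)
        (totals ++ (match acc with | some a => [a] | none => [])) := by
  cases acc with
  | none =>
    show altRun fuel _ totals = altRun fuel _ (totals ++ [])
    rw [List.append_nil]
    rfl

  | some a => rfl

theorem altRun_eq (fuel : Nat) :
    ∀ (stack : List ((List (Int × Int)) × Int × Option Int)) (totals : List Int),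
      wt stack ≤ fuel → altRun fuel stack totals = totals ++ stack.flatMap frameOut := by
  induction fuel with
  | zero =>
    intro stack totals h
    cases stack with
    | nil => simp [altRun]
    | cons f rest =>
      exfalso
      have : 1 ≤ Nat.factorial (f.1.length + 1) := Nat.one_le_iff_ne_zero.mpr (Nat.factorial_ne_zero _)
      simp [wt] at h
      omega
  | succ fuel ih =>
    intro stack totals h
    cases stack with
    | nil => simp [altRun]
    | cons f rest =>
      obtain ⟨rem, last, acc⟩ := f
      rw [altRun_succ]
      have hn1 : 1 ≤ Nat.factorial rem.length := Nat.one_le_iff_ne_zero.mpr (Nat.factorial_ne_zero _)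
      have hwc := wt_children_le rem last (acc.getD 0)
      have hfact : Nat.factorial (rem.length + 1) = (rem.length + 1) * Nat.factorial rem.length :=
        Nat.factorial_succ _
      have hx : (rem.length + 1) * Nat.factorial rem.length
          = rem.length * Nat.factorial rem.length + Nat.factorial rem.length := by ring
      have hstack : wt ((rem, last, acc) :: rest) = Nat.factorial (rem.length + 1) + wt rest := by
        simp [wt]
      have hfuel : wt (((rem.filter (fun d => d.1 == last || d.2 == last)).map
          (fun d => (rem.filter (fun x => x ≠ d), (if d.1 == last then d.2 else d.1),
            some ((acc.getD 0) + (d.1 + d.2))))) ++ rest) ≤ fuel := by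
        rw [wt_append]
        rw [hstack] at h
        linarith
      rw [ih _ _ hfuel]
      rw [List.flatMap_cons, List.flatMap_append]
      have hframe : (totals ++ (match acc with | some a => [a] | none => [])) ++
          ((((rem.filter (fun d => d.1 == last || d.2 == last))).map
            (fun d => (rem.filter (fun x => x ≠ d), (if d.1 == last then d.2 else d.1),
              some ((acc.getD 0) + (d.1 + d.2))))).flatMap frameOut)
          = totals ++ frameOut (rem, last, acc) := by
        cases acc with
        | none =>
          simp only [frameOut, List.flatMap_map, find_totals_eq rem last, Option.getD]
          simp
        | some a =>
          simp only [frameOut, List.flatMap_map, find_totals_eq rem last, Option.getD]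
          simp [Function.comp_def, List.map_flatMap, add_assoc]
      rw [← List.append_assoc, hframe, List.append_assoc]

-- ===== VERDICT (by name: the statement is the Claim_ definition above) =====
theorem find_totals_spec : Claim_equal_find_totals := by
  intro dominoes last_num _
  unfold Spec_find_totals find_totals_alt
  rw [altRun_eq _ _ _ (by simp [wt])]
  simp [frameOut]
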